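-- pv_equiv track=rewrite | github.com/rolandpg/zettelforge | memory/memory/synthesis_retriever.py | _index_entities_by_type
-- ===== SOURCE A (Python) =====
-- from typing import Dict, List, Optional, Tuple, Any
--
-- def _index_entities_by_type(entities: List[str]) -> Dict[str, List[str]]:
--     """Index entities by type (for quick lookup)."""
--     index = {
--         "cve": [],
--         "actor": [],
--         "tool": [],
--         "campaign": [],
--         "other": []
--     }
--
--     for entity in entities:
--         if entity.startswith('cve-'):
--             index["cve"].append(entity)
--         elif any(x in entity for x in ['apt', 'lazarus', 'volty', 'muddy']):
--             index["actor"].append(entity)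
--         else:
--             index["other"].append(entity)
--
--     return index
-- ===== SOURCE B (Python) =====
-- from typing import Dict, List
--
-- def _index_entities_by_type(entities: List[str]) -> Dict[str, List[str]]:
--     """Index entities by type (for quick lookup)."""
--     is_cve = lambda e: e.startswith('cve-')
--     is_actor = lambda e: any(x in e for x in ['apt', 'lazarus', 'volty', 'muddy'])
--     return {
--         "cve": [e for e in entities if is_cve(e)],
--         "actor": [e for e in entities if not is_cve(e) and is_actor(e)],
--         "tool": [],
--         "campaign": [],
--         "other": [e for e in entities if not is_cve(e) and not is_actor(e)],
--     }
-- ===== Notes on version B (the rewrite author's own statement) =====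
-- stated objective: simpler
-- what changed: Replaces the single dispatching loop that mutates dict buckets with three independent filtering comprehensions, one per non-empty bucket, returned in a dict literal.
import Mathlib
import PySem

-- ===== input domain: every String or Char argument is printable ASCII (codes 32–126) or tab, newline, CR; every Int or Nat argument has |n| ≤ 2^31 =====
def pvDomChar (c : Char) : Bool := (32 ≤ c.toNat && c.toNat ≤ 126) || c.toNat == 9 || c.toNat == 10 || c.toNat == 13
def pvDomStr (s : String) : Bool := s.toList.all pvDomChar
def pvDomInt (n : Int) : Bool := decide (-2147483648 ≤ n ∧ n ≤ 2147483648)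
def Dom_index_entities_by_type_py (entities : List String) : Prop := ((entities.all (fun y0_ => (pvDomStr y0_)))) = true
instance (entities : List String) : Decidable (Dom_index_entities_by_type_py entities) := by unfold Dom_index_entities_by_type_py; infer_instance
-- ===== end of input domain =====

-- B replaces A's single dispatching loop (mutating dict buckets) with three independent
-- filtering passes, one per non-empty bucket; objective: simpler.

-- ===== PORT A =====
-- one loop step: dispatch one entity into its bucket of the dict
def pvStepA (d : PySem.Dict String (List String)) (e : String) : PySem.Dict String (List String) :=
  if PySem.Str.startswith e "cve-" then
    d.modify "cve" [] (fun l => l ++ [e])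
  else if ["apt", "lazarus", "volty", "muddy"].any (fun x => PySem.Str.isIn x e) then
    d.modify "actor" [] (fun l => l ++ [e])
  else
    d.modify "other" [] (fun l => l ++ [e])

def index_entities_by_type_py (entities : List String) : List (String × List String) :=
  (entities.foldl pvStepA
    (PySem.Dict.mk [("cve", []), ("actor", []), ("tool", []), ("campaign", []), ("other", [])])).items

-- ===== PORT B =====
def pvIsCve (e : String) : Bool := PySem.Str.startswith e "cve-"
def pvIsActor (e : String) : Bool := ["apt", "lazarus", "volty", "muddy"].any (fun x => PySem.Str.isIn x e)

def index_entities_by_type_py_alt (entities : List String) : List (String × List String) :=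
  [ ("cve", entities.filter (fun e => pvIsCve e)),
    ("actor", entities.filter (fun e => !pvIsCve e && pvIsActor e)),
    ("tool", []),
    ("campaign", []),
    ("other", entities.filter (fun e => !pvIsCve e && !pvIsActor e)) ]

-- ===== PRECONDITION & SPEC =====
def Spec_index_entities_by_type_py (entities : List String) (out : List (String × List String)) : Prop := out = index_entities_by_type_py_alt entities
instance (entities : List String) (out : List (String × List String)) : Decidable (Spec_index_entities_by_type_py entities out) := by unfold Spec_index_entities_by_type_py; infer_instance

-- ===== CLAIM (what is proved, stated in full; the proofs are below) =====
def Claim_equal_index_entities_by_type_py : Prop := ∀ (entities : List String), Dom_index_entities_by_type_py entities → Spec_index_entities_by_type_py entities (index_entities_by_type_py entities)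

-- ===== LEMMAS AND PROOFS =====

-- loop invariant: folding A's step over es from a dict with accumulated buckets a/b/c
-- yields exactly the three filters appended to those buckets
theorem pvFoldA_inv (es : List String) (a b c : List String) :
    (es.foldl pvStepA
        (PySem.Dict.mk [("cve", a), ("actor", b), ("tool", []), ("campaign", []), ("other", c)])).items
      = [ ("cve", a ++ es.filter (fun e => pvIsCve e)),
          ("actor", b ++ es.filter (fun e => !pvIsCve e && pvIsActor e)),
          ("tool", ([] : List String)),
          ("campaign", ([] : List String)),
          ("other", c ++ es.filter (fun e => !pvIsCve e && !pvIsActor e)) ] := by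
  induction es generalizing a b c with
  | nil => simp
  | cons e es ih =>
    by_cases h1 : pvIsCve e = true
    · have : pvStepA (PySem.Dict.mk [("cve", a), ("actor", b), ("tool", []), ("campaign", []), ("other", c)]) e
          = PySem.Dict.mk [("cve", a ++ [e]), ("actor", b), ("tool", []), ("campaign", []), ("other", c)] := by
        simp [pvStepA, pvIsCve] at h1 ⊢
        simp [h1, PySem.Dict.modify, PySem.Dict.insert, PySem.Dict.getD, PySem.Dict.get?]
      simp only [List.foldl_cons, this, ih]
      simp [h1]
    · by_cases h2 : pvIsActor e = true
      · have : pvStepA (PySem.Dict.mk [("cve", a), ("actor", b), ("tool", []), ("campaign", []), ("other", c)]) e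
            = PySem.Dict.mk [("cve", a), ("actor", b ++ [e]), ("tool", []), ("campaign", []), ("other", c)] := by
          simp [pvIsCve] at h1
          simp [pvIsActor] at h2
          simp [pvStepA, h1, h2, PySem.Dict.modify, PySem.Dict.insert, PySem.Dict.getD, PySem.Dict.get?]
        simp only [List.foldl_cons, this, ih]
        simp [h1, h2]
      · have : pvStepA (PySem.Dict.mk [("cve", a), ("actor", b), ("tool", []), ("campaign", []), ("other", c)]) e
            = PySem.Dict.mk [("cve", a), ("actor", b), ("tool", []), ("campaign", []), ("other", c ++ [e])] := by
          simp [pvIsCve] at h1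
          simp [pvIsActor] at h2
          simp [pvStepA, h1, h2, PySem.Dict.modify, PySem.Dict.insert, PySem.Dict.getD, PySem.Dict.get?]
        simp only [List.foldl_cons, this, ih]
        simp [h1, h2]

-- ===== VERDICT (by name: the statement is the Claim_ definition above) =====
theorem index_entities_by_type_py_spec : Claim_equal_index_entities_by_type_py := by
  intro entities _
  show index_entities_by_type_py entities = index_entities_by_type_py_alt entities
  simp [index_entities_by_type_py, index_entities_by_type_py_alt, pvFoldA_inv]
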